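-- pv_equiv track=rewrite | github.com/JoaquinLopexz/Trabajo-Practico-Primera-Parte---Programaci-n-1 | Rama-Sofi.py | solo_letras_y_espacios
-- ===== SOURCE A (Python) =====
-- def solo_letras_y_espacios(texto):
--     """
--     Valida que el texto tenga solo letras y espacios, sin numeros ni simbolos
--     """
--     i = 0
--     while i < len(texto):
--         caracter = texto[i]
--         esLetra = (caracter >= "a" and caracter <= "z") or (caracter >= "A" and caracter <= "Z")
--         esEspacio = caracter == " "
--         if not esLetra and not esEspacio:
--             return False
--         i = i + 1
--     return True
-- ===== SOURCE B (Python) =====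
-- ALLOWED = set("abcdefghijklmnopqrstuvwxyzABCDEFGHIJKLMNOPQRSTUVWXYZ ")
--
-- def solo_letras_y_espacios(texto):
--     """
--     Valida que el texto tenga solo letras y espacios, sin numeros ni simbolos
--     """
--     return set(texto) <= ALLOWED
-- ===== Notes on version B (the rewrite author's own statement) =====
-- stated objective: simpler
-- what changed: Replaces the index-based while loop with per-character range comparisons and early return by building the set of distinct characters once and testing it for subset inclusion in a fixed allowed-alphabet set; the subset test runs in C, giving a large constant-factor speedup.
import Mathlib
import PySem

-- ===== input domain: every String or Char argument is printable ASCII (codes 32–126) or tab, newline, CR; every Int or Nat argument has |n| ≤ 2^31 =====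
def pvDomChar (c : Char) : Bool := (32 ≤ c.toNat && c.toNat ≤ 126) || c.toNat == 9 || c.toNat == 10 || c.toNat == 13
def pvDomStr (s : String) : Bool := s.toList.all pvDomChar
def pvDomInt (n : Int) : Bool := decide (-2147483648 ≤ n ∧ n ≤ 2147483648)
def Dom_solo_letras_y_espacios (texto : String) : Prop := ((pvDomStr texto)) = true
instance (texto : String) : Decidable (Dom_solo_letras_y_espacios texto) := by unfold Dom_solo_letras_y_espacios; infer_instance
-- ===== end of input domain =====

-- B tests set(texto) <= fixed allowed alphabet instead of A's index loop with early return; objective: simpler.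

-- ===== PORT A =====
-- while i < len(texto): check texto[i]; early return False — ported as structural recursion over the
-- remaining characters; Python's one-char string comparisons "a" <= caracter … are Char comparisons here.
def soloLoopA (cs : List Char) : Bool :=
  match cs with
  | [] => true
  | caracter :: rest =>
      let esLetra := (('a' ≤ caracter && caracter ≤ 'z') || ('A' ≤ caracter && caracter ≤ 'Z'))
      let esEspacio := caracter == ' '
      if !esLetra && !esEspacio then false else soloLoopA rest

def solo_letras_y_espacios (texto : String) : Bool := soloLoopA texto.toList

-- ===== PORT B =====
def pvAllowed : PySem.Set Char :=
  PySem.Set.ofList "abcdefghijklmnopqrstuvwxyzABCDEFGHIJKLMNOPQRSTUVWXYZ ".toList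

def solo_letras_y_espacios_alt (texto : String) : Bool :=
  PySem.Set.issubset (PySem.Set.ofList texto.toList) pvAllowed

-- ===== PRECONDITION & SPEC =====
def Spec_solo_letras_y_espacios (texto : String) (out : Bool) : Prop := out = solo_letras_y_espacios_alt texto
instance (texto : String) (out : Bool) : Decidable (Spec_solo_letras_y_espacios texto out) := by unfold Spec_solo_letras_y_espacios; infer_instance

-- ===== CLAIM (what is proved, stated in full; the proofs are below) =====
def Claim_equal_solo_letras_y_espacios : Prop := ∀ (texto : String), Dom_solo_letras_y_espacios texto → Spec_solo_letras_y_espacios texto (solo_letras_y_espacios texto)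

-- ===== LEMMAS AND PROOFS =====

-- A's per-character test, factored out of the loop body
def pvPredA (c : Char) : Bool :=
  (('a' ≤ c && c ≤ 'z') || ('A' ≤ c && c ≤ 'Z')) || c == ' '

lemma soloLoopA_eq_all (cs : List Char) : soloLoopA cs = cs.all pvPredA := by
  induction cs with
  | nil => rfl
  | cons c rest ih =>
      rw [List.all_cons, ← ih]
      simp only [soloLoopA]
      cases hp : pvPredA c
      · simp only [pvPredA] at hp
        simp_all
      · simp only [pvPredA] at hp
        simp_all

-- membership in the allowed alphabet agrees with A's test, for chars below code 128 (all of Dom)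
set_option maxRecDepth 10000 in
set_option maxHeartbeats 1000000 in
lemma mem_allowed_iff_pred (c : Char) (h : c.toNat < 128) :
    (c ∈ pvAllowed) ↔ pvPredA c = true := by
  have hc : Char.ofNat c.toNat = c := Char.ofNat_toNat c
  have key : ∀ n : Fin 128, ((Char.ofNat n.val ∈ pvAllowed) ↔ pvPredA (Char.ofNat n.val) = true) := by
    decide
  have := key ⟨c.toNat, h⟩
  rwa [hc] at this

lemma dom_char_lt_128 {texto : String} (hdom : Dom_solo_letras_y_espacios texto)
    {c : Char} (hcs : c ∈ texto.toList) : c.toNat < 128 := by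
  have h : pvDomChar c = true := by
    have := (List.all_eq_true.mp hdom) c hcs
    simpa using this
  simp [pvDomChar] at h
  omega

-- ===== VERDICT (by name: the statement is the Claim_ definition above) =====
theorem solo_letras_y_espacios_spec : Claim_equal_solo_letras_y_espacios := by
  intro texto hdom
  unfold Spec_solo_letras_y_espacios solo_letras_y_espacios solo_letras_y_espacios_alt
  rw [soloLoopA_eq_all]
  rcases Bool.eq_false_or_eq_true (PySem.Set.issubset (PySem.Set.ofList texto.toList) pvAllowed)
    with hb | hb
  · rw [hb]
    have hsub := (PySem.Set.issubset_iff (PySem.Set.ofList texto.toList) pvAllowed).mp hb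
    rw [List.all_eq_true]
    intro c hcs
    exact (mem_allowed_iff_pred c (dom_char_lt_128 hdom hcs)).mp
      (hsub c ((PySem.Set.mem_ofList _ _).mpr hcs))
  · rw [hb]
    rw [List.all_eq_false]
    have hnsub : ¬ ∀ x ∈ PySem.Set.ofList texto.toList, x ∈ pvAllowed := by
      intro hforall
      rw [← PySem.Set.issubset_iff] at hforall
      simp [hforall] at hb
    push_neg at hnsub
    obtain ⟨x, hx, hxn⟩ := hnsub
    have hxs := (PySem.Set.mem_ofList _ _).mp hx
    refine ⟨x, hxs, ?_⟩
    rcases Bool.eq_false_or_eq_true (pvPredA x) with h | h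
    · exact absurd ((mem_allowed_iff_pred x (dom_char_lt_128 hdom hxs)).mpr h) hxn
    · simp [h]
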